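-- pv_equiv track=rewrite | github.com/algowizzzz/mcp-intelligence-agent | sajhamcpserver/sajha/tools/impl/edgar_concept_map.py | filter_and_sort_records
-- ===== SOURCE A (Python) =====
-- from typing import List, Optional
--
-- def filter_and_sort_records(records: List[dict], form_type: str, periods: int) -> List[dict]:
--     """Filter by form_type, deduplicate by end date, sort descending, take top N."""
--     if form_type and form_type.upper() not in ('BOTH', 'ALL'):
--         records = [r for r in records if r.get('form', '') == form_type.upper()]
--     # Deduplicate by end date — keep most recently filed
--     seen = {}
--     for r in records:
--         end = r.get('end', '')
--         if end not in seen or r.get('filed', '') > seen[end].get('filed', ''):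
--             seen[end] = r
--     records = list(seen.values())
--     records.sort(key=lambda x: x.get('end', ''), reverse=True)
--     return records[:min(periods, 20)]
-- ===== SOURCE B (Python) =====
-- def filter_and_sort_records(records, form_type, periods):
--     """Filter by form_type, then repeatedly select the latest remaining end date
--     and its most recently filed record (selection instead of dict + sort)."""
--     if form_type and form_type.upper() not in ('BOTH', 'ALL'):
--         records = [r for r in records if r.get('form', '') == form_type.upper()]
--     result = []
--     remaining = records
--     while remaining:
--         top = max(r.get('end', '') for r in remaining)
--         best = None
--         rest = []
--         for r in remaining:
--             if r.get('end', '') == top: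
--                 if best is None or r.get('filed', '') > best.get('filed', ''):
--                     best = r
--             else:
--                 rest.append(r)
--         result.append(best)
--         remaining = rest
--     return result[:min(periods, 20)]
-- ===== Notes on version B (the rewrite author's own statement) =====
-- stated objective: alternative
-- what changed: A dedups by end date in a dict keyed by end and then sorts the dict values descending; B never builds a dict or sorts: it repeatedly selects the maximal remaining end date and, in one splitting pass, its most recently filed record, emitting results already in descending order.
import Mathlib
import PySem

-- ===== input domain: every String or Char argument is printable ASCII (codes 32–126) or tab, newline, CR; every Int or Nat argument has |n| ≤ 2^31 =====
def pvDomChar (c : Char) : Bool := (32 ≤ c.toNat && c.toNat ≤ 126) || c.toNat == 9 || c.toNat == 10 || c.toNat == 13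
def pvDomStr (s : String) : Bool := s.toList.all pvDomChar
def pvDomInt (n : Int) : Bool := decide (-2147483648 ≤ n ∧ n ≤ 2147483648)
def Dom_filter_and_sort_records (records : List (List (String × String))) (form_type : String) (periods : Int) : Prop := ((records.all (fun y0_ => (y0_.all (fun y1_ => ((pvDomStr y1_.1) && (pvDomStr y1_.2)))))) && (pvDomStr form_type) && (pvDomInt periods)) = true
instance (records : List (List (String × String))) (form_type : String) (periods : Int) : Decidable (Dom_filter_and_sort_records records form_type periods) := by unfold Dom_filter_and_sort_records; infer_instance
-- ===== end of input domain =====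

-- B replaces A's dict-dedup-then-sort by repeated selection of the latest remaining
-- end date (no dict, no sort); equal return value on all inputs (A mutates no argument).

-- ===== PORT A =====
-- r.get(k, '') on a record (a Python dict, here an association list)
def pvGet (r : List (String × String)) (k : String) : String :=
  (PySem.Dict.mk r).getD k ""

def filter_and_sort_records (records : List (List (String × String))) (form_type : String) (periods : Int) : List (List (String × String)) :=
  let fu := PySem.Str.upper form_type
  let recs := if form_type ≠ "" ∧ fu ≠ "BOTH" ∧ fu ≠ "ALL"
    then records.filter (fun r => pvGet r "form" == fu) else records
  -- seen = {}; for r in recs: ...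
  let seen := recs.foldl (fun d r =>
      let e := pvGet r "end"
      -- 'end not in seen or r.get('filed','') > seen[end].get('filed','')'
      -- (seen[end] is only read when present; getD with a dead default is that read)
      if !d.contains e || decide (pvGet (d.getD e []) "filed" < pvGet r "filed")
      then d.insert e r else d)
    PySem.Dict.empty
  let vals := seen.values
  let sortedv := PySem.List.sorted vals (fun x => pvGet x "end") true
  PySem.List.slice sortedv none (some (min periods 20))

-- ===== PORT B =====
-- the inner for-loop of B: one pass splitting off the best record with end == top
def selPass (top : String) (remaining : List (List (String × String))) :
    Option (List (String × String)) × List (List (String × String)) :=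
  remaining.foldl (fun st r =>
    if pvGet r "end" == top then
      (match st.1 with
       | none => (some r, st.2)
       | some b => (if decide (pvGet b "filed" < pvGet r "filed") then some r else some b, st.2))
    else (st.1, st.2 ++ [r])) (none, [])

theorem selPass_snd_eq_filter (top : String) (l : List (List (String × String))) :
    (selPass top l).2 = l.filter (fun r => !(pvGet r "end" == top)) := by
  suffices h : ∀ (t : List (List (String × String))) (b0 : Option (List (String × String))) (acc : List (List (String × String))),
      (t.foldl (fun st r =>
        if pvGet r "end" == top then
          (match st.1 with
           | none => (some r, st.2)
           | some b => (if decide (pvGet b "filed" < pvGet r "filed") then some r else some b, st.2))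
        else (st.1, st.2 ++ [r])) (b0, acc)).2 = acc ++ t.filter (fun r => !(pvGet r "end" == top)) by
    simpa [selPass] using h l none []
  intro t
  induction t with
  | nil => intro b0 acc; simp
  | cons r t ih =>
    intro b0 acc
    rw [List.foldl_cons]
    cases hb : pvGet r "end" == top
    · rw [if_neg (by simp)]
      rw [ih]
      simp [hb]
    · rw [if_pos rfl]
      cases b0 <;>
      · rw [ih]
        simp [hb]

-- B's while-loop: pull out the best record of the largest remaining end date, recurse
def selLoop (remaining : List (List (String × String))) : List (List (String × String)) :=
  match hm : PySem.List.max? (remaining.map (fun r => pvGet r "end")) (fun x => x) with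
  | none => []           -- remaining is empty: the while-loop stops
  | some top =>
    match hp : selPass top remaining with
    | (none, _) => []    -- unreachable: some record has end == top
    | (some b, rest) => b :: selLoop rest
termination_by remaining.length
decreasing_by
  have h2 : rest = remaining.filter (fun r => !(pvGet r "end" == top)) := by
    have h3 := selPass_snd_eq_filter top remaining
    rw [hp] at h3; exact h3
  obtain ⟨r0, hr0, he0⟩ := List.mem_map.mp (PySem.List.max?_mem hm)
  subst h2
  exact List.length_filter_lt_length_iff_exists.mpr ⟨r0, hr0, by simp [he0]⟩

def filter_and_sort_records_alt (records : List (List (String × String))) (form_type : String) (periods : Int) : List (List (String × String)) :=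
  let fu := PySem.Str.upper form_type
  let recs := if form_type ≠ "" ∧ fu ≠ "BOTH" ∧ fu ≠ "ALL"
    then records.filter (fun r => pvGet r "form" == fu) else records
  PySem.List.slice (selLoop recs) none (some (min periods 20))

-- ===== PRECONDITION & SPEC =====
def Spec_filter_and_sort_records (records : List (List (String × String))) (form_type : String) (periods : Int) (out : List (List (String × String))) : Prop := out = filter_and_sort_records_alt records form_type periods
instance (records : List (List (String × String))) (form_type : String) (periods : Int) (out : List (List (String × String))) : Decidable (Spec_filter_and_sort_records records form_type periods out) := by unfold Spec_filter_and_sort_records; infer_instance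

-- ===== CLAIM (what is proved, stated in full; the proofs are below) =====
def Claim_equal_filter_and_sort_records : Prop := ∀ (records : List (List (String × String))) (form_type : String) (periods : Int), Dom_filter_and_sort_records records form_type periods → Spec_filter_and_sort_records records form_type periods (filter_and_sort_records records form_type periods)

-- ===== LEMMAS AND PROOFS =====

-- the record A's dict keeps for end date ε after scanning l (none if ε is no end date of l)
def bestFor (l : List (List (String × String))) (ε : String) : Option (List (String × String)) :=
  l.foldl (fun acc r =>
    if pvGet r "end" == ε then
      (match acc with
       | none => some r
       | some b => if decide (pvGet b "filed" < pvGet r "filed") then some r else some b)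
    else acc) none

-- A's dict-building loop, named for the proofs
def foldA (l : List (List (String × String))) : PySem.Dict String (List (String × String)) :=
  l.foldl (fun d r =>
    let e := pvGet r "end"
    if !d.contains e || decide (pvGet (d.getD e []) "filed" < pvGet r "filed")
    then d.insert e r else d) PySem.Dict.empty

theorem foldA_append (l : List (List (String × String))) (r : List (String × String)) :
    foldA (l ++ [r]) =
      (if !(foldA l).contains (pvGet r "end")
          || decide (pvGet ((foldA l).getD (pvGet r "end") []) "filed" < pvGet r "filed")
       then (foldA l).insert (pvGet r "end") r else foldA l) := by
  simp [foldA, List.foldl_append]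

theorem bestFor_append (l : List (List (String × String))) (r : List (String × String)) (ε : String) :
    bestFor (l ++ [r]) ε =
      (if pvGet r "end" == ε then
        (match bestFor l ε with
         | none => some r
         | some b => if decide (pvGet b "filed" < pvGet r "filed") then some r else some b)
      else bestFor l ε) := by
  simp [bestFor, List.foldl_append]

theorem dedup_append_singleton {α : Type} [BEq α] [LawfulBEq α] (xs : List α) (x : α) :
    PySem.List.dedup (xs ++ [x]) =
      if x ∈ PySem.List.dedup xs then PySem.List.dedup xs else PySem.List.dedup xs ++ [x] := by
  simp [PySem.List.dedup_eq_ofList, PySem.Set.ofList, PySem.Set.add]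

theorem bestFor_eq_none_iff (l : List (List (String × String))) (ε : String) :
    bestFor l ε = none ↔ ε ∉ l.map (fun r => pvGet r "end") := by
  induction l using List.reverseRecOn with
  | nil => simp [bestFor]
  | append_singleton l r ih =>
    rw [bestFor_append]
    by_cases hb : (pvGet r "end" == ε) = true
    · have he : pvGet r "end" = ε := by simpa using hb
      rw [if_pos hb]
      cases hbf : bestFor l ε with
      | none => simp [List.mem_append, he]
      | some b0 =>
        have hmem0 : ε ∈ l.map (fun r => pvGet r "end") := by
          by_contra hn
          rw [← ih] at hn
          rw [hbf] at hn; exact Option.some_ne_none b0 hn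
        constructor
        · intro hnone
          exfalso
          split at hnone <;> (try split at hnone) <;> simp_all
        · intro hnot; exfalso
          exact hnot (by rw [List.map_append]; exact List.mem_append.mpr (Or.inl hmem0))
    · have hne : pvGet r "end" ≠ ε := by simpa using hb
      rw [if_neg hb, ih]
      simp [List.mem_append, Ne.symm hne]

theorem bestFor_mem (l : List (List (String × String))) (ε : String) :
    ∀ b, bestFor l ε = some b → pvGet b "end" = ε ∧ b ∈ l := by
  induction l using List.reverseRecOn with
  | nil => intro b h; simp [bestFor] at h
  | append_singleton l r ih =>
    intro b h
    rw [bestFor_append] at h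
    by_cases hb : (pvGet r "end" == ε) = true
    · have he : pvGet r "end" = ε := by simpa using hb
      rw [if_pos hb] at h
      cases hbf : bestFor l ε with
      | none => rw [hbf] at h; simp at h; subst h; simp [he]
      | some b0 =>
        rw [hbf] at h
        obtain ⟨h0, hm0⟩ := ih b0 hbf
        by_cases hlt : (decide (pvGet b0 "filed" < pvGet r "filed")) = true
        · simp only [hlt, if_true] at h
          simp at h; subst h; simp [he]
        · simp only [hlt, if_false] at h
          simp at h; subst h; simp [h0, hm0]
    · rw [if_neg hb] at h
      obtain ⟨h0, hm0⟩ := ih b h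
      simp [h0, hm0]

theorem foldA_spec (l : List (List (String × String))) :
    (foldA l).keys = PySem.List.dedup (l.map (fun r => pvGet r "end")) ∧
    ∀ ε, (foldA l).get? ε = bestFor l ε := by
  induction l using List.reverseRecOn with
  | nil =>
    constructor
    · simp [foldA, PySem.Dict.keys_empty, PySem.List.dedup_eq_ofList, PySem.Set.ofList]
    · intro ε; simp [foldA, bestFor, PySem.Dict.get?_empty]
  | append_singleton l r ih =>
    obtain ⟨hk, hg⟩ := ih
    rw [foldA_append]
    have hded := dedup_append_singleton (l.map (fun r => pvGet r "end")) (pvGet r "end")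
    rw [List.map_append] at *
    cases hc : (foldA l).contains (pvGet r "end")
    · -- new end date: A inserts, the key is appended
      have hnm : pvGet r "end" ∉ PySem.List.dedup (l.map (fun r => pvGet r "end")) := by
        intro hmem
        rw [← hk] at hmem
        rw [(PySem.Dict.contains_iff_mem_keys _ _).mpr hmem] at hc
        simp at hc
      rw [show (!false || decide (pvGet ((foldA l).getD (pvGet r "end") []) "filed" < pvGet r "filed")) = true by rfl]
      rw [if_pos rfl]
      constructor
      · rw [PySem.Dict.keys_insert_of_not_contains _ _ hc, hk]
        simp only [List.map_cons, List.map_nil] at hded ⊢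
        rw [hded, if_neg hnm]
      · intro ε
        have hnone : bestFor l (pvGet r "end") = none := by
          rw [bestFor_eq_none_iff]
          rw [← PySem.List.mem_dedup]
          exact hnm
        rw [PySem.Dict.get?_insert, bestFor_append]
        by_cases hεe : ε = pvGet r "end"
        · subst hεe
          rw [if_pos rfl, if_pos (by simp), hnone]
        · rw [if_neg hεe, if_neg (by simpa using Ne.symm hεe), hg]
    · -- end date already present: A keeps the more recently filed record
      have hmem : pvGet r "end" ∈ PySem.List.dedup (l.map (fun r => pvGet r "end")) := by
        rw [← hk]; exact (PySem.Dict.contains_iff_mem_keys _ _).mp hc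
      have hkeys_ded : PySem.List.dedup (l.map (fun r => pvGet r "end") ++ [pvGet r "end"]) = PySem.List.dedup (l.map (fun r => pvGet r "end")) := by
        simp only [List.map_cons, List.map_nil] at hded
        rw [hded, if_pos hmem]
      obtain ⟨b0, hb0⟩ : ∃ b0, bestFor l (pvGet r "end") = some b0 := by
        cases hbf : bestFor l (pvGet r "end") with
        | none =>
          exfalso
          have := (bestFor_eq_none_iff _ _).mp hbf
          rw [← PySem.List.mem_dedup] at this
          exact this hmem
        | some b0 => exact ⟨b0, rfl⟩
      have hgetD : (foldA l).getD (pvGet r "end") [] = b0 := by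
        simp [PySem.Dict.getD, hg, hb0]
      rw [hgetD]
      cases hlt : decide (pvGet b0 "filed" < pvGet r "filed")
      · -- keep the stored record
        rw [show (!true || false) = false by rfl, if_neg (by simp)]
        constructor
        · rw [hk]
          simp only [List.map_cons, List.map_nil]
          exact hkeys_ded.symm
        · intro ε
          rw [hg, bestFor_append]
          by_cases hεe : (pvGet r "end" == ε) = true
          · have : ε = pvGet r "end" := by simpa using (eq_comm.mp (by simpa using hεe))
            subst this
            rw [if_pos hεe, hb0]
            show some b0 = if decide (pvGet b0 "filed" < pvGet r "filed") = true then some r else some b0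
            rw [if_neg (by rw [hlt]; simp)]
          · rw [if_neg hεe]
      · -- overwrite in place
        rw [show (!true || true) = true by rfl, if_pos rfl]
        constructor
        · rw [PySem.Dict.keys_insert_of_contains _ _ hc, hk]
          simp only [List.map_cons, List.map_nil]
          exact hkeys_ded.symm
        · intro ε
          rw [PySem.Dict.get?_insert, bestFor_append]
          by_cases hεe : ε = pvGet r "end"
          · subst hεe
            rw [if_pos rfl, if_pos (by simp), hb0]
            show some r = if decide (pvGet b0 "filed" < pvGet r "filed") = true then some r else some b0
            rw [if_pos hlt]
          · rw [if_neg hεe, if_neg (by simpa using Ne.symm hεe), hg]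

theorem selPass_fst_eq_bestFor (top : String) (l : List (List (String × String))) :
    (selPass top l).1 = bestFor l top := by
  suffices h : ∀ (t : List (List (String × String))) (b0 : Option (List (String × String))) (acc : List (List (String × String))),
      (t.foldl (fun st r =>
        if pvGet r "end" == top then
          (match st.1 with
           | none => (some r, st.2)
           | some b => (if decide (pvGet b "filed" < pvGet r "filed") then some r else some b, st.2))
        else (st.1, st.2 ++ [r])) (b0, acc)).1 =
      t.foldl (fun acc r =>
        if pvGet r "end" == top then
          (match acc with
           | none => some r
           | some b => if decide (pvGet b "filed" < pvGet r "filed") then some r else some b)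
        else acc) b0 by
    simpa [selPass, bestFor] using h l none []
  intro t
  induction t with
  | nil => intro b0 acc; simp
  | cons r t ih =>
    intro b0 acc
    rw [List.foldl_cons, List.foldl_cons]
    cases hb : pvGet r "end" == top
    · rw [if_neg (by simp), if_neg (by simp)]
      exact ih b0 (acc ++ [r])
    · rw [if_pos rfl, if_pos rfl]
      cases b0 <;> exact ih _ acc

theorem selLoop_nil_of_none (l : List (List (String × String)))
    (hm : PySem.List.max? (l.map (fun r => pvGet r "end")) (fun x => x) = none) :
    selLoop l = [] := by
  rw [selLoop]
  split
  · rfl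
  · rename_i top h
    rw [hm] at h; cases h

theorem selLoop_nil_of_pass_none (l : List (List (String × String))) (top : String)
    (snd : List (List (String × String)))
    (hm : PySem.List.max? (l.map (fun r => pvGet r "end")) (fun x => x) = some top)
    (hp : selPass top l = (none, snd)) :
    selLoop l = [] := by
  rw [selLoop]
  split
  · rfl
  · rename_i top' h
    rw [hm] at h; injection h with h; subst h
    split
    · rfl
    · rename_i b' rest' h2
      rw [hp] at h2
      cases h2

theorem selLoop_cons (l : List (List (String × String))) (top : String)
    (b : List (String × String)) (rest : List (List (String × String)))
    (hm : PySem.List.max? (l.map (fun r => pvGet r "end")) (fun x => x) = some top)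
    (hp : selPass top l = (some b, rest)) :
    selLoop l = b :: selLoop rest := by
  rw [selLoop]
  split
  · rename_i h; rw [hm] at h; cases h
  · rename_i top' h
    rw [hm] at h; injection h with h; subst h
    split
    · rename_i snd h2; rw [hp] at h2; cases h2
    · rename_i b' rest' h2
      rw [hp] at h2
      obtain ⟨h3, h4⟩ := Prod.mk.injEq .. ▸ h2
      injection h3 with h3
      subst h3; subst h4; rfl

theorem sel_mem (l : List (List (String × String))) : ∀ x ∈ selLoop l, x ∈ l := by
  induction l using selLoop.induct with
  | case1 l hm => rw [selLoop_nil_of_none l hm]; simp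
  | case2 l top hm rest hp => rw [selLoop_nil_of_pass_none l top rest hm hp]; simp
  | case3 l top hm b rest hp ih =>
    rw [selLoop_cons l top b rest hm hp]
    intro x hx
    have hrest : rest = l.filter (fun r => !(pvGet r "end" == top)) := by
      have h3 := selPass_snd_eq_filter top l
      rw [hp] at h3; exact h3
    rcases List.mem_cons.mp hx with h | h
    · subst h
      have hbf : bestFor l top = some x := by
        have := selPass_fst_eq_bestFor top l
        rw [hp] at this; exact this.symm
      exact (bestFor_mem l top x hbf).2
    · have := ih x h
      rw [hrest] at this
      exact List.mem_of_mem_filter this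

theorem bestFor_filter (l : List (List (String × String))) (top ε : String) (hne : ε ≠ top) :
    bestFor (l.filter (fun r => !(pvGet r "end" == top))) ε = bestFor l ε := by
  induction l using List.reverseRecOn with
  | nil => rfl
  | append_singleton l r ih =>
    rw [List.filter_append, bestFor_append]
    cases hb : pvGet r "end" == top
    · have : List.filter (fun r => !(pvGet r "end" == top)) [r] = [r] := by simp [hb]
      rw [this, bestFor_append, ih]
    · have : List.filter (fun r => !(pvGet r "end" == top)) [r] = [] := by simp [hb]
      rw [this, List.append_nil, ih]
      have he : pvGet r "end" = top := by simpa using hb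
      rw [if_neg (by simp [he]; exact fun h => hne h.symm)]

theorem sel_char (l : List (List (String × String))) :
    (selLoop l).Perm
      ((PySem.List.dedup (l.map (fun r => pvGet r "end"))).map (fun ε => (bestFor l ε).getD [])) ∧
    (selLoop l).Pairwise (fun a b => pvGet b "end" < pvGet a "end") := by
  induction l using selLoop.induct with
  | case1 l hm =>
    have : l = [] := by
      cases l with
      | nil => rfl
      | cons x t => simp [PySem.List.max?_eq_none_iff] at hm
    subst this
    constructor
    · rw [selLoop_nil_of_none [] hm]; simp [PySem.List.dedup_eq_ofList, PySem.Set.ofList]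
    · rw [selLoop_nil_of_none [] hm]; simp
  | case2 l top hm rest hp =>
    exfalso
    obtain ⟨r0, hr0, he0⟩ := List.mem_map.mp (PySem.List.max?_mem hm)
    have hbf : bestFor l top = none := by
      have := selPass_fst_eq_bestFor top l
      rw [hp] at this; exact this.symm
    exact (bestFor_eq_none_iff l top).mp hbf (List.mem_map.mpr ⟨r0, hr0, he0⟩)
  | case3 l top hm b rest hp ih =>
    have hrest : rest = l.filter (fun r => !(pvGet r "end" == top)) := by
      have h3 := selPass_snd_eq_filter top l
      rw [hp] at h3; exact h3
    have hbf : bestFor l top = some b := by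
      have := selPass_fst_eq_bestFor top l
      rw [hp] at this; exact this.symm
    obtain ⟨hbe, hbl⟩ := bestFor_mem l top b hbf
    have hmax : ∀ y ∈ l, pvGet y "end" ≤ top := by
      intro y hy
      exact PySem.List.max?_isMax hm _ (List.mem_map.mpr ⟨y, hy, rfl⟩)
    have hrest_ne : ∀ ε ∈ PySem.List.dedup (rest.map (fun r => pvGet r "end")), ε ≠ top := by
      intro ε hε
      rw [PySem.List.mem_dedup] at hε
      obtain ⟨r0, hr0, he0⟩ := List.mem_map.mp hε
      rw [hrest] at hr0
      have := List.of_mem_filter hr0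
      intro hεt
      rw [← he0] at hεt
      simp [hεt] at this
    have hselrw : selLoop l = b :: selLoop rest := selLoop_cons l top b rest hm hp
    obtain ⟨ihp, ihs⟩ := ih
    constructor
    · rw [hselrw]
      have step2 : (PySem.List.dedup (rest.map (fun r => pvGet r "end"))).map
            (fun ε => (bestFor rest ε).getD []) =
          (PySem.List.dedup (rest.map (fun r => pvGet r "end"))).map
            (fun ε => (bestFor l ε).getD []) := by
        apply List.map_congr_left
        intro ε hε
        rw [hrest, bestFor_filter l top ε (hrest_ne ε hε)]
      have hperm3 : (top :: PySem.List.dedup (rest.map (fun r => pvGet r "end"))).Perm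
          (PySem.List.dedup (l.map (fun r => pvGet r "end"))) := by
        rw [List.perm_ext_iff_of_nodup
          (List.nodup_cons.mpr ⟨fun h => hrest_ne top h rfl, PySem.List.nodup_dedup _⟩)
          (PySem.List.nodup_dedup _)]
        intro ε
        simp only [List.mem_cons, PySem.List.mem_dedup]
        constructor
        · rintro (h | h)
          · subst h
            obtain ⟨r0, hr0, he0⟩ := List.mem_map.mp (PySem.List.max?_mem hm)
            exact List.mem_map.mpr ⟨r0, hr0, he0⟩
          · obtain ⟨r0, hr0, he0⟩ := List.mem_map.mp h
            rw [hrest] at hr0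
            exact List.mem_map.mpr ⟨r0, List.mem_of_mem_filter hr0, he0⟩
        · intro h
          obtain ⟨r0, hr0, he0⟩ := List.mem_map.mp h
          by_cases hεt : ε = top
          · exact Or.inl hεt
          · refine Or.inr (List.mem_map.mpr ⟨r0, ?_, he0⟩)
            rw [hrest]
            refine List.mem_filter.mpr ⟨hr0, ?_⟩
            have hne0 : pvGet r0 "end" ≠ top := by rw [he0]; exact hεt
            simp [hne0]
      have p1 := List.Perm.cons b ihp
      rw [step2] at p1
      have e2 : (b :: (PySem.List.dedup (rest.map (fun r => pvGet r "end"))).map (fun ε => (bestFor l ε).getD []))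
          = (top :: PySem.List.dedup (rest.map (fun r => pvGet r "end"))).map (fun ε => (bestFor l ε).getD []) := by
        rw [List.map_cons, hbf]
        rfl
      rw [e2] at p1
      exact p1.trans (hperm3.map _)
    · rw [hselrw]
      refine List.pairwise_cons.mpr ⟨?_, ihs⟩
      intro x hx
      have hxrest := sel_mem rest x hx
      have hxl : x ∈ l := by
        rw [hrest] at hxrest; exact List.mem_of_mem_filter hxrest
      have hle : pvGet x "end" ≤ top := hmax x hxl
      have hne : pvGet x "end" ≠ top := by
        rw [hrest] at hxrest
        have := List.of_mem_filter hxrest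
        intro hh; simp [hh] at this
      rw [hbe]
      exact lt_of_le_of_ne hle hne

theorem key_equiv : ∀ (l : List (List (String × String))),
    PySem.List.sorted
      (l.foldl (fun d r =>
        let e := pvGet r "end"
        if !d.contains e || decide (pvGet (d.getD e []) "filed" < pvGet r "filed")
        then d.insert e r else d) PySem.Dict.empty).values
      (fun x => pvGet x "end") true = selLoop l := by
  intro l
  obtain ⟨hk, hg⟩ := foldA_spec l
  obtain ⟨hp, hs⟩ := sel_char l
  have hvals : (foldA l).values =
      (PySem.List.dedup (l.map (fun r => pvGet r "end"))).map (fun ε => (bestFor l ε).getD []) := by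
    rw [PySem.Dict.values_eq_map_keys (foldA l) (hk ▸ PySem.List.nodup_dedup _) [], hk]
    apply List.map_congr_left
    intro ε _
    simp [PySem.Dict.getD, hg]
  have : (l.foldl (fun d r =>
        let e := pvGet r "end"
        if !d.contains e || decide (pvGet (d.getD e []) "filed" < pvGet r "filed")
        then d.insert e r else d) PySem.Dict.empty) = foldA l := rfl
  rw [this, hvals]
  exact PySem.List.sorted_rev_eq_of_perm_of_pairwise_gt _ _ _ (hvals ▸ hp) hs

-- ===== VERDICT (by name: the statement is the Claim_ definition above) =====
theorem filter_and_sort_records_spec : Claim_equal_filter_and_sort_records := by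
  intro records form_type periods _
  unfold Spec_filter_and_sort_records filter_and_sort_records filter_and_sort_records_alt
  simp only []
  rw [key_equiv]
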